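-- pv_equiv track=rewrite | github.com/t-0hmura/pdb2reaction | pdb2reaction/scan.py | _collect_scan_list_values
-- ===== SOURCE A (Python) =====
-- from typing import Any, Dict, Iterable, List, Optional, Sequence, Tuple
--
-- def _collect_scan_list_values(argv: Sequence[str], names: Sequence[str]) -> Tuple[List[str], int]:
--     """Return scan-list literals following a single flag and the number of flag occurrences."""
--     values: List[str] = []
--     flag_count = 0
--     i = 0
--     while i < len(argv):
--         tok = argv[i]
--         if tok in names:
--             flag_count += 1
--             j = i + 1
--             while j < len(argv) and not argv[j].startswith("-"):
--                 values.append(argv[j])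
--                 j += 1
--             i = j
--         else:
--             i += 1
--     return values, flag_count
-- ===== SOURCE B (Python) =====
-- def _collect_scan_list_values(argv, names):
--     """Single flat pass with a boolean 'collecting' state instead of nested while loops."""
--     values = []
--     flag_count = 0
--     collecting = False
--     for tok in argv:
--         if collecting and not tok.startswith("-"):
--             values.append(tok)
--         elif tok in names:
--             flag_count += 1
--             collecting = True
--         else:
--             collecting = False
--     return values, flag_count
-- ===== Notes on version B (the rewrite author's own statement) =====
-- stated objective: simpler
-- what changed: Replaced the nested while-loops with index jumping by a single flat pass over argv that carries a boolean 'collecting' state.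
import Mathlib
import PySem

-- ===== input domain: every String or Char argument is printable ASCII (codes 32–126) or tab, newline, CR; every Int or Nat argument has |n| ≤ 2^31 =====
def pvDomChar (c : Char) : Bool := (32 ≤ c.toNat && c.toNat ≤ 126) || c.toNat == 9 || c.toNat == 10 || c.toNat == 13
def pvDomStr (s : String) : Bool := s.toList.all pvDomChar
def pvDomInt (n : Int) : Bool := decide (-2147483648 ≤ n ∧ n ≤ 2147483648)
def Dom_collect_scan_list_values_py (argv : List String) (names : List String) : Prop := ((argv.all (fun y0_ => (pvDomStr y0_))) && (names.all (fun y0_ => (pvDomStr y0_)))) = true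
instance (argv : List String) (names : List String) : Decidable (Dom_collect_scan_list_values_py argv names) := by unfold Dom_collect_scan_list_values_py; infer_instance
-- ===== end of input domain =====

-- B replaces A's nested while-loops with index jumping by one flat fold over argv
-- carrying a boolean "collecting" state (objective: simpler decomposition, same cost).

-- ===== PORT A =====
-- inner while loop: collect tokens from index j until one starts with "-"
def pvInnerA (argv : List String) (j : Nat) (values : List String) : List String × Nat :=
  if h : j < argv.length then
    if PySem.Str.startswith argv[j] "-" then (values, j)
    else pvInnerA argv (j + 1) (values ++ [argv[j]])
  else (values, j)
termination_by argv.length - j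

theorem pvInnerA_ge (argv : List String) (j : Nat) (values : List String) :
    j ≤ (pvInnerA argv j values).2 := by
  unfold pvInnerA
  split
  · split
    · simp
    · have := pvInnerA_ge argv (j + 1) (values ++ [argv[j]!])
      simp_all; omega
  · simp
termination_by argv.length - j

-- outer while loop over i
def pvOuterA (argv : List String) (names : List String) (i : Nat)
    (values : List String) (flag_count : Int) : List String × Int :=
  if h : i < argv.length then
    if names.contains argv[i] then
      let r := pvInnerA argv (i + 1) values
      pvOuterA argv names r.2 r.1 (flag_count + 1)
    else
      pvOuterA argv names (i + 1) values flag_count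
  else (values, flag_count)
termination_by argv.length - i
decreasing_by
  · have := pvInnerA_ge argv (i + 1) values; omega
  · omega

def collect_scan_list_values_py (argv : List String) (names : List String) : List String × Int :=
  pvOuterA argv names 0 [] 0

-- ===== PORT B =====
-- one step of the flat loop: state = (values, flag_count, collecting)
def pvStepB (names : List String) (st : List String × Int × Bool) (tok : String) :
    List String × Int × Bool :=
  if st.2.2 = true ∧ PySem.Str.startswith tok "-" = false then
    (st.1 ++ [tok], st.2.1, true)
  else if names.contains tok then
    (st.1, st.2.1 + 1, true)
  else
    (st.1, st.2.1, false)

def collect_scan_list_values_py_alt (argv : List String) (names : List String) : List String × Int :=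
  let st := argv.foldl (pvStepB names) ([], 0, false)
  (st.1, st.2.1)

-- ===== PRECONDITION & SPEC =====
def Spec_collect_scan_list_values_py (argv : List String) (names : List String) (out : List String × Int) : Prop := out = collect_scan_list_values_py_alt argv names
instance (argv : List String) (names : List String) (out : List String × Int) : Decidable (Spec_collect_scan_list_values_py argv names out) := by unfold Spec_collect_scan_list_values_py; infer_instance

-- ===== CLAIM (what is proved, stated in full; the proofs are below) =====
def Claim_equal_collect_scan_list_values_py : Prop := ∀ (argv : List String) (names : List String), Dom_collect_scan_list_values_py argv names → Spec_collect_scan_list_values_py argv names (collect_scan_list_values_py argv names)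

-- ===== LEMMAS AND PROOFS =====

def pvProj (st : List String × Int × Bool) : List String × Int := (st.1, st.2.1)

theorem pvStep_dash (names : List String) (vs : List String) (c : Int) (tok : String)
    (h : PySem.Str.startswith tok "-" = true) :
    pvStepB names (vs, c, true) tok = pvStepB names (vs, c, false) tok := by
  have h' : PySem.Chars.startswith tok.toList ['-'] = true := by simpa using h
  simp [pvStepB, h']

-- collecting-state fold over the suffix = A's inner loop, then the non-collecting fold from where it stopped
theorem pvInner_eq (argv names : List String) : ∀ (n j : Nat), argv.length - j ≤ n →
    ∀ (vs : List String) (c : Int),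
    pvProj (List.foldl (pvStepB names) (vs, c, true) (argv.drop j))
      = pvProj (List.foldl (pvStepB names) ((pvInnerA argv j vs).1, c, false)
          (argv.drop (pvInnerA argv j vs).2)) := by
  intro n
  induction n with
  | zero =>
    intro j hj vs c
    have hge : argv.length ≤ j := by omega
    rw [List.drop_eq_nil_of_le hge]
    unfold pvInnerA
    rw [dif_neg (by omega)]
    rw [List.drop_eq_nil_of_le hge]
    rfl
  | succ n ih =>
    intro j hj vs c
    by_cases h : j < argv.length
    · rw [List.drop_eq_getElem_cons h]
      unfold pvInnerA
      rw [dif_pos h]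
      by_cases hd : PySem.Str.startswith argv[j] "-" = true
      · rw [if_pos hd]
        simp only [List.foldl_cons]
        rw [pvStep_dash names vs c argv[j] hd]
        rw [List.drop_eq_getElem_cons h]
        rfl
      · rw [if_neg hd]
        simp only [List.foldl_cons]
        have hstep : pvStepB names (vs, c, true) argv[j] = (vs ++ [argv[j]], c, true) := by
          have hd' : PySem.Chars.startswith argv[j].toList ['-'] = false := by
            simpa using eq_false_of_ne_true hd
          simp [pvStepB, hd']
        rw [hstep]
        exact ih (j + 1) (by omega) (vs ++ [argv[j]]) c
    · have hge : argv.length ≤ j := by omega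
      rw [List.drop_eq_nil_of_le hge]
      unfold pvInnerA
      rw [dif_neg (by omega)]
      rw [List.drop_eq_nil_of_le hge]
      rfl

theorem pvOuter_eq (argv names : List String) : ∀ (n i : Nat), argv.length - i ≤ n →
    ∀ (vs : List String) (c : Int),
    pvOuterA argv names i vs c
      = pvProj (List.foldl (pvStepB names) (vs, c, false) (argv.drop i)) := by
  intro n
  induction n with
  | zero =>
    intro i hi vs c
    have hge : argv.length ≤ i := by omega
    rw [List.drop_eq_nil_of_le hge]
    unfold pvOuterA
    rw [dif_neg (by omega)]
    rfl
  | succ n ih =>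
    intro i hi vs c
    by_cases h : i < argv.length
    · rw [List.drop_eq_getElem_cons h]
      unfold pvOuterA
      rw [dif_pos h]
      by_cases hm : names.contains argv[i] = true
      · rw [if_pos hm]
        simp only [List.foldl_cons]
        have hstep : pvStepB names (vs, c, false) argv[i] = (vs, c + 1, true) := by
          simp [pvStepB]; simpa using hm
        rw [hstep]
        have hinner := pvInner_eq argv names (argv.length - (i + 1)) (i + 1) (le_refl _) vs (c + 1)
        rw [hinner]
        have hge2 := pvInnerA_ge argv (i + 1) vs
        exact ih (pvInnerA argv (i + 1) vs).2 (by omega)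
          (pvInnerA argv (i + 1) vs).1 (c + 1)
      · rw [if_neg hm]
        simp only [List.foldl_cons]
        have hstep : pvStepB names (vs, c, false) argv[i] = (vs, c, false) := by
          simp [pvStepB]; simpa using hm
        rw [hstep]
        exact ih (i + 1) (by omega) vs c
    · have hge : argv.length ≤ i := by omega
      rw [List.drop_eq_nil_of_le hge]
      unfold pvOuterA
      rw [dif_neg (by omega)]
      rfl

-- ===== VERDICT (by name: the statement is the Claim_ definition above) =====
theorem collect_scan_list_values_py_spec : Claim_equal_collect_scan_list_values_py := by
  intro argv names _
  unfold Spec_collect_scan_list_values_py collect_scan_list_values_py collect_scan_list_values_py_alt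
  have := pvOuter_eq argv names argv.length 0 (by omega) [] 0
  simpa using this
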